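-- pv_equiv track=rewrite | github.com/pypi-data/pypi-mirror-386 | packages/anyscale/anyscale-0.26.70.tar.gz/anyscale-0.26.70/anyscale/commands/workspace_commands_v2.py | _parse_user_args
-- ===== SOURCE A (Python) =====
-- from typing import List, Optional, Tuple
--
-- def _parse_user_args(user_args: List[str]) -> Tuple[List[str], List[str]]:
--     """Parse user arguments into options and commands."""
--     # Find where command section starts (first non-option argument)
--     command_start_idx = None
--     for i, arg in enumerate(user_args):
--         if arg and not arg.startswith("-"):
--             command_start_idx = i
--             break
--
--     if command_start_idx is not None:
--         user_options = [arg for arg in user_args[:command_start_idx] if arg]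
--         user_command = [arg for arg in user_args[command_start_idx:] if arg]
--     else:
--         user_options = [arg for arg in user_args if arg]
--         user_command = []
--
--     return user_options, user_command
-- ===== SOURCE B (Python) =====
-- from typing import List, Tuple
--
-- def _parse_user_args(user_args: List[str]) -> Tuple[List[str], List[str]]:
--     """Parse user arguments into options and commands (single pass)."""
--     options: List[str] = []
--     command: List[str] = []
--     in_command = False
--     for arg in user_args:
--         if not arg:
--             continue
--         if in_command:
--             command.append(arg)
--         elif arg.startswith("-"):
--             options.append(arg)
--         else:
--             in_command = True
--             command.append(arg)
--     return options, command
-- ===== Notes on version B (the rewrite author's own statement) =====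
-- stated objective: simpler
-- what changed: Replaced the locate-index-then-slice-and-double-filter structure with a single accumulation pass over the list using an in_command flag.
import Mathlib
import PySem

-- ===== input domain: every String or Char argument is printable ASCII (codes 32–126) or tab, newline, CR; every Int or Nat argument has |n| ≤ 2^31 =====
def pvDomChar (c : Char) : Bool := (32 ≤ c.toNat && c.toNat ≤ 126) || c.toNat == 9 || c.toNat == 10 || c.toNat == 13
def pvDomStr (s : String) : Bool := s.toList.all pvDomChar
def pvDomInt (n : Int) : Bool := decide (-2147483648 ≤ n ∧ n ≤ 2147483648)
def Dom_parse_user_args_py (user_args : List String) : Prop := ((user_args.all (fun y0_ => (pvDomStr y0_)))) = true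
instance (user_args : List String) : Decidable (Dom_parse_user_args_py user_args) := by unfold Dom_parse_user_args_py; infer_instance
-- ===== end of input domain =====

-- B replaces A's find-index-then-slice-and-filter-twice structure by one accumulation
-- pass with an in_command flag; objective: simpler (same O(n) cost).

-- ===== PORT A =====
-- the enumerate/break loop: first index i with arg truthy and not starting with "-"
def pvFindStart (l : List String) (i : Nat) : Option Nat :=
  match l with
  | [] => none
  | a :: rest =>
      if a ≠ "" ∧ ¬ (PySem.Str.startswith a "-") then some i else pvFindStart rest (i + 1)

def parse_user_args_py (user_args : List String) : List String × List String :=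
  match pvFindStart user_args 0 with
  | some idx =>
      -- user_args[:idx] / user_args[idx:]: idx ∈ [0, len], so take/drop are exact here
      ((user_args.take idx).filter (fun a => a ≠ ""),
       (user_args.drop idx).filter (fun a => a ≠ ""))
  | none => (user_args.filter (fun a => a ≠ ""), [])

-- ===== PORT B =====
-- loop state (in_command, options, command); appends at the back as the Python does
def pvStepB (st : Bool × List String × List String) (arg : String) :
    Bool × List String × List String :=
  if arg = "" then st
  else if st.1 then (st.1, st.2.1, st.2.2 ++ [arg])
  else if PySem.Str.startswith arg "-" then (st.1, st.2.1 ++ [arg], st.2.2)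
  else (true, st.2.1, st.2.2 ++ [arg])

def parse_user_args_py_alt (user_args : List String) : List String × List String :=
  let st := user_args.foldl pvStepB (false, [], [])
  (st.2.1, st.2.2)

-- ===== PRECONDITION & SPEC =====
def Spec_parse_user_args_py (user_args : List String) (out : List String × List String) : Prop := out = parse_user_args_py_alt user_args
instance (user_args : List String) (out : List String × List String) : Decidable (Spec_parse_user_args_py user_args out) := by unfold Spec_parse_user_args_py; infer_instance

-- ===== CLAIM (what is proved, stated in full; the proofs are below) =====
def Claim_equal_parse_user_args_py : Prop := ∀ (user_args : List String), Dom_parse_user_args_py user_args → Spec_parse_user_args_py user_args (parse_user_args_py user_args)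

-- ===== LEMMAS AND PROOFS =====

-- reference recursion both ports are reduced to
def pvRef : List String → List String × List String
  | [] => ([], [])
  | a :: rest =>
      if a = "" then pvRef rest
      else if PySem.Str.startswith a "-" then
        (a :: (pvRef rest).1, (pvRef rest).2)
      else ([], a :: rest.filter (fun x => x ≠ ""))

theorem pvFindStart_shift (l : List String) (i : Nat) :
    pvFindStart l i = (pvFindStart l 0).map (· + i) := by
  induction l generalizing i with
  | nil => rfl
  | cons a rest ih =>
      simp only [pvFindStart]
      split
      · simp
      · rw [ih (i+1), ih 1, Option.map_map]
        congr 1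
        funext n
        simp
        omega

theorem A_eq_ref (l : List String) : parse_user_args_py l = pvRef l := by
  induction l with
  | nil => rfl
  | cons a rest ih =>
      simp only [parse_user_args_py, pvFindStart] at *
      by_cases hcmd : a ≠ "" ∧ ¬ PySem.Str.startswith a "-"
      · have hd' : PySem.Chars.startswith a.toList ['-'] = false := by
          simpa using hcmd.2
        rw [if_pos hcmd]
        simp [pvRef, hcmd.1, hd']
      · rw [if_neg hcmd, pvFindStart_shift rest 1]
        push Not at hcmd
        cases hf : pvFindStart rest 0 with
        | none =>
            rw [hf] at ih
            by_cases h1 : a = ""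
            · subst h1
              simp [pvRef, ← ih]
            · have hd' : PySem.Chars.startswith a.toList ['-'] = true := by
                simpa using hcmd h1
              simp [pvRef, h1, hd', ← ih]
        | some j =>
            rw [hf] at ih
            by_cases h1 : a = ""
            · subst h1
              simp only [Option.map_some]
              simp [pvRef, List.take_succ_cons, List.drop_succ_cons,
                    ← ih]
            · have hd' : PySem.Chars.startswith a.toList ['-'] = true := by
                simpa using hcmd h1
              simp only [Option.map_some]
              simp [pvRef, h1, hd', List.take_succ_cons, List.drop_succ_cons,
                    ← ih]

theorem foldB_true (l : List String) (opts cmd : List String) :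
    l.foldl pvStepB (true, opts, cmd) = (true, opts, cmd ++ l.filter (fun x => x ≠ "")) := by
  induction l generalizing cmd with
  | nil => simp
  | cons a rest ih =>
      by_cases h1 : a = ""
      · subst h1
        simp [pvStepB, ih]
      · simp [pvStepB, h1, ih]

theorem foldB_false (l : List String) (opts : List String) :
    ((l.foldl pvStepB (false, opts, [])).2.1, (l.foldl pvStepB (false, opts, [])).2.2)
      = (opts ++ (pvRef l).1, (pvRef l).2) := by
  induction l generalizing opts with
  | nil => simp [pvRef]
  | cons a rest ih =>
      by_cases h1 : a = ""
      · subst h1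
        simp [pvStepB, pvRef, ih]
      · by_cases hd : PySem.Str.startswith a "-"
        · have hd' : PySem.Chars.startswith a.toList ['-'] = true := by simpa using hd
          have hstep : pvStepB (false, opts, []) a = (false, opts ++ [a], []) := by
            simp [pvStepB, h1, hd']
          rw [List.foldl_cons, hstep, ih]
          simp [pvRef, h1, hd']
        · have hd' : PySem.Chars.startswith a.toList ['-'] = false := by simpa using hd
          simp [pvStepB, h1, hd', pvRef, foldB_true]

theorem B_eq_ref (l : List String) : parse_user_args_py_alt l = pvRef l := by
  have h := foldB_false l []
  simp only [List.nil_append] at h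
  simpa [parse_user_args_py_alt] using h

-- ===== VERDICT (by name: the statement is the Claim_ definition above) =====
theorem parse_user_args_py_spec : Claim_equal_parse_user_args_py := by
  intro l _
  unfold Spec_parse_user_args_py
  rw [A_eq_ref, B_eq_ref]
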